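-- pv_equiv track=rewrite | github.com/dgonzalezarbelo/Codigo-TFG-Informatica | syntactic.py | combAND_with_not
-- ===== SOURCE A (Python) =====
-- K = 4 # Tamaño del clique
--
-- def is_prefix(f, g) :
--     if len(f) > len(g) : return False
--     else : return f == g[:len(f)]
--
-- def reduce(f, k = (K * (K-1) // 2), use_not = True) :
--     l = len(f)
--     for i in range(l) :
--         f[i] = list(set(f[i]))
--         f[i].sort()
--
--     # Ordenamos las cláusulas para luego hacer fácilmente la absorción de cláusulas inútiles
--     f.sort()
--
--     # Quitar elementos que no aportan informacion
--     res = []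
--     # Vamos a marcar las cláusulas inútiles (por absorción o por ser demasiado largas en caso de no usar puertas NOT)
--     mark = [False] * l
--
--     '''ESTE FOR SOLO CUANDO NO HAY NOTS'''
--     if not use_not:
--         for i in range(l) :
--             if len(f[i]) > k : mark[i] = True
--
--     for i in range(l) :
--         if mark[i] : continue
--         # Si la cláusula i es prefijo de la j, al combinarlas con OR se absorbe la j, así que no nos sirve
--         for j in range(i+1, l) :
--             if is_prefix(f[i], f[j]) : mark[j] = True
--         res.append(f[i])
--     return res
--
-- def combAND_with_not(f, g) :
--     aux = []
--     n1 = len(f); n2 = len(g)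
--     for i in range(n1) :
--         for j in range(n2) :
--             aux.append(f[i] + g[j])
--
--     # Eliminar aquellas que se cancelan por los not
--     ret = []
--     for i in aux :
--         ok = True
--         for j in i :
--             if (-j) in i :
--                 ok = False
--                 break
--         if ok : ret.append(i)
--     return reduce(ret)
-- ===== SOURCE B (Python) =====
-- def combAND_with_not(f, g):
--     # Per-side pre-filter: keep only self-consistent clauses, as literal sets.
--     fs = [s for s in map(set, f) if all(-x not in s for x in s)]
--     gs = [s for s in map(set, g) if all(-x not in s for x in s)]
--     # Cross product, dropping pairs with a cross-side conflict; normalize to sorted tuples.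
--     clauses = {tuple(sorted(a | b)) for a in fs for b in gs
--                if all(-x not in b for x in a)}
--     # Absorption decided locally: a clause survives iff none of its proper
--     # prefixes is itself a clause (hash-set lookups, no pairwise comparison).
--     kept = [list(c) for c in clauses
--             if all(c[:k] not in clauses for k in range(len(c)))]
--     kept.sort()
--     return kept
-- ===== Notes on version B (the rewrite author's own statement) =====
-- stated objective: faster
-- what changed: B replaces A's sort-then-quadratic-forward-marking absorption by a local rule on a hash set of normalized clauses (a clause is kept iff none of its proper prefixes is itself a clause, per-clause O(L) set lookups instead of the O(m^2) pairwise marking pass), splits contradiction detection into a per-side self-consistency pre-filter plus a cross-side conflict test on literal sets, and sorts only the kept clauses.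
import Mathlib
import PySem

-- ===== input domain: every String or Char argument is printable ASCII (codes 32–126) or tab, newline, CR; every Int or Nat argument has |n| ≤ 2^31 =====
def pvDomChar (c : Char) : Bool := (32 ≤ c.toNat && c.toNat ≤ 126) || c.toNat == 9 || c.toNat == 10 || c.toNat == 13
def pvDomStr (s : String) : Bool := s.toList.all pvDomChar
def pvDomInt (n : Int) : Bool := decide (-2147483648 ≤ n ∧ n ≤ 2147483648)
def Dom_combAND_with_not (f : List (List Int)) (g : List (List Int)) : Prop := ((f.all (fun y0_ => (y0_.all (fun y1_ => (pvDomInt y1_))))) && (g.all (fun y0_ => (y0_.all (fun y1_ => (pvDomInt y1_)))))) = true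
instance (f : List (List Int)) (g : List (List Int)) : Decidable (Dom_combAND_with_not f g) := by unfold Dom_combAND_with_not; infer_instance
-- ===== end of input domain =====

-- B decides absorption locally — a normalized clause is kept iff none of its proper prefixes is
-- itself a clause of the hash set of normalized clauses — instead of A's sort + quadratic
-- forward-marking pass, with contradictions split into a per-side pre-filter and a cross test;
-- return values proved identical.

-- ===== PORT A =====
def KconstPy : Int := 4  -- K = 4

def isPrefixPy (f : List Int) (g : List Int) : Bool :=
  if f.length > g.length then false
  else f == PySem.List.slice g none (some (f.length : Int))

def reducePy (f : List (List Int)) (k : Int) (use_not : Bool) : List (List Int) :=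
  let l := f.length
  -- f[i] = list(set(f[i])); f[i].sort()  (element-wise update)
  let f2 := f.map (fun c => PySem.List.sorted (PySem.Set.ofList c) (fun x => x) false)
  -- f.sort()
  let f3 := PySem.List.sorted f2 (fun x => x) false
  let mark0 : List Bool :=
    if !use_not then
      (PySem.List.pyRange 0 (l : Int) 1).foldl (fun m i =>
        if ((PySem.List.pyGetD f3 i []).length : Int) > k then PySem.List.pySetD m i true else m)
        (List.replicate l false)
    else List.replicate l false
  (((PySem.List.pyRange 0 (l : Int) 1).foldl (fun (st : List Bool × List (List Int)) i =>
      if PySem.List.pyGetD st.1 i false then st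
      else
        let m := (PySem.List.pyRange (i + 1) (l : Int) 1).foldl (fun m j =>
            if isPrefixPy (PySem.List.pyGetD f3 i []) (PySem.List.pyGetD f3 j []) then
              PySem.List.pySetD m j true
            else m) st.1
        (m, st.2 ++ [PySem.List.pyGetD f3 i []])) (mark0, ([] : List (List Int))))).2

def combAND_with_not (f : List (List Int)) (g : List (List Int)) : List (List Int) :=
  let n1 : Int := f.length
  let n2 : Int := g.length
  let aux := (PySem.List.pyRange 0 n1 1).foldl (fun acc i =>
      (PySem.List.pyRange 0 n2 1).foldl (fun acc j =>
        acc ++ [PySem.List.pyGetD f i [] ++ PySem.List.pyGetD g j []]) acc) []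
  -- ok-loop: ok = not any(-x in i for x in i); if ok: ret.append(i)
  let ret := aux.foldl (fun r c =>
      if !(c.any (fun x => c.contains (-x))) then r ++ [c] else r) []
  reducePy ret (PySem.Int.floordiv (KconstPy * (KconstPy - 1)) 2) true

-- ===== PORT B =====
def selfOkSet (s : PySem.Set Int) : Bool := !(s.any (fun x => PySem.Set.contains s (-x)))

def crossOk (a : PySem.Set Int) (b : PySem.Set Int) : Bool :=
  !(a.any (fun x => PySem.Set.contains b (-x)))

def combAND_with_not_alt (f : List (List Int)) (g : List (List Int)) : List (List Int) :=
  let fs := (f.map (fun c => PySem.Set.ofList c)).filter selfOkSet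
  let gs := (g.map (fun c => PySem.Set.ofList c)).filter selfOkSet
  -- clauses = {tuple(sorted(a | b)) for a in fs for b in gs if no cross-conflict}
  let clauses : PySem.Set (List Int) := PySem.Set.ofList (fs.flatMap (fun a =>
      gs.filterMap (fun b =>
        if crossOk a b then
          some (PySem.List.sorted (PySem.Set.union a b) (fun x => x) false)
        else none)))
  -- kept = clauses whose proper prefixes are all absent from the clause set
  let kept := clauses.filter (fun c =>
      (List.range c.length).all (fun k => !(PySem.Set.contains clauses (c.take k))))
  PySem.List.sorted kept (fun x => x) false

-- ===== PRECONDITION & SPEC =====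
def Spec_combAND_with_not (f : List (List Int)) (g : List (List Int)) (out : List (List Int)) : Prop := out = combAND_with_not_alt f g
instance (f : List (List Int)) (g : List (List Int)) (out : List (List Int)) : Decidable (Spec_combAND_with_not f g out) := by unfold Spec_combAND_with_not; infer_instance

-- ===== CLAIM (what is proved, stated in full; the proofs are below) =====
def Claim_equal_combAND_with_not : Prop := ∀ (f : List (List Int)) (g : List (List Int)), Dom_combAND_with_not f g → Spec_combAND_with_not f g (combAND_with_not f g)

-- ===== LEMMAS AND PROOFS =====

theorem isPrefixPy_iff (p c : List Int) : isPrefixPy p c = true ↔ p <+: c := by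
  unfold isPrefixPy
  by_cases h : p.length > c.length
  · simp only [h, if_true, Bool.false_eq_true, false_iff]
    intro hp
    have := hp.length_le
    omega
  · rw [if_neg h, PySem.List.slice_to_natCast]
    simp only [beq_iff_eq]
    constructor
    · intro he; exact he ▸ List.take_prefix _ _
    · intro hp; exact (List.prefix_iff_eq_take.1 hp)

theorem conflict_iff (a b : List Int) :
    (∃ x, x ∈ a ++ b ∧ -x ∈ a ++ b) ↔
      ((∃ x ∈ a, -x ∈ a) ∨ (∃ x ∈ b, -x ∈ b) ∨ (∃ x ∈ a, -x ∈ b)) := by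
  constructor
  · rintro ⟨x, hx, hnx⟩
    rcases List.mem_append.1 hx with h1 | h1 <;> rcases List.mem_append.1 hnx with h2 | h2
    · exact Or.inl ⟨x, h1, h2⟩
    · exact Or.inr (Or.inr ⟨x, h1, h2⟩)
    · exact Or.inr (Or.inr ⟨-x, h2, by simpa using h1⟩)
    · exact Or.inr (Or.inl ⟨x, h1, h2⟩)
  · rintro (⟨x, h1, h2⟩ | ⟨x, h1, h2⟩ | ⟨x, h1, h2⟩) <;>
      exact ⟨x, by simp [h1], by simp [h2]⟩

theorem conflict_split (a b : List Int) :
    (!((a ++ b).any (fun x => (a ++ b).contains (-x))))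
    = (selfOkSet (PySem.Set.ofList a) && selfOkSet (PySem.Set.ofList b)
        && crossOk (PySem.Set.ofList a) (PySem.Set.ofList b)) := by
  rw [Bool.eq_iff_iff]
  have L : (!((a ++ b).any (fun x => (a ++ b).contains (-x)))) = true
      ↔ ¬∃ x, x ∈ a ++ b ∧ -x ∈ a ++ b := by
    simp only [List.contains_eq_mem, List.any_append, Bool.not_or, Bool.and_eq_true,
      Bool.not_eq_eq_eq_not, Bool.not_true, List.any_eq_false, decide_eq_true_eq,
      not_exists, not_and]
    constructor
    · rintro ⟨h1, h2⟩ x hx; exact (List.mem_append.1 hx).elim (h1 x) (h2 x)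
    · intro h
      exact ⟨fun x hx => h x (List.mem_append_left _ hx),
             fun x hx => h x (List.mem_append_right _ hx)⟩
  rw [L, conflict_iff]
  simp only [Bool.and_eq_true, selfOkSet, crossOk, PySem.Set.contains_eq_listContains,
    List.contains_eq_mem, PySem.Set.mem_ofList, Bool.not_eq_eq_eq_not, Bool.not_true,
    List.any_eq_false, decide_eq_true_eq]
  simp only [not_or, not_exists, not_and]
  tauto

theorem sortedDedup_append (a b : List Int) :
    PySem.List.sorted (PySem.Set.ofList (a ++ b)) (fun x => x) false
    = PySem.List.sorted (PySem.Set.union (PySem.Set.ofList a) (PySem.Set.ofList b)) (fun x => x) false := by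
  apply PySem.List.sorted_eq_sorted_of_perm _ _ _ (fun x y h => h)
  rw [List.perm_ext_iff_of_nodup (PySem.Set.nodup_ofList _)
    (PySem.Set.nodup_union _ _ (PySem.Set.nodup_ofList _))]
  intro x
  simp [PySem.Set.mem_ofList, PySem.Set.mem_union]

theorem auxEq (f g : List (List Int)) :
    (PySem.List.pyRange 0 (f.length : Int) 1).foldl (fun acc i =>
      (PySem.List.pyRange 0 (g.length : Int) 1).foldl (fun acc j =>
        acc ++ [PySem.List.pyGetD f i [] ++ PySem.List.pyGetD g j []]) acc) []
    = f.flatMap (fun a => g.map (a ++ ·)) := by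
  simp only [PySem.List.foldl_append_singleton_eq_map, PySem.List.foldl_append_eq_flatMap]
  rw [PySem.List.pyRange_one, PySem.List.pyRange_one]
  simp only [Int.sub_zero, Int.toNat_natCast, List.flatMap_map, List.map_map]
  conv_rhs => rw [show f = (List.range f.length).map (fun k => f.getD k []) from
    (List.ext_getElem (by simp) (fun i h1 h2 => by
      simp [List.getD_eq_getElem?_getD, (by simpa using h2 : i < f.length)])).symm]
  rw [List.flatMap_map]
  apply List.flatMap_congr
  intro k hk
  simp only [List.mem_range] at hk
  have hf : PySem.List.pyGetD f (0 + (k : Int)) [] = f.getD k [] := by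
    norm_num [PySem.List.pyGetD_natCast]
  rw [hf]
  apply List.ext_getElem (by simp)
  intro i h1 h2
  have h2' : i < g.length := by simpa using h2
  simp only [List.getElem_map, Function.comp_apply, List.getElem_range]
  have hg : PySem.List.pyGetD g (0 + (i : Int)) [] = g.getD i [] := by
    norm_num [PySem.List.pyGetD_natCast]
  rw [hg]
  simp [List.getD_eq_getElem?_getD, h2']

theorem map_filter_eq_filterMap {α β : Type} (p : α → Bool) (f : α → β) (l : List α) :
    (l.filter p).map f = l.filterMap (fun x => if p x then some (f x) else none) := by
  induction l with
  | nil => rfl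
  | cons x xs ih => by_cases h : p x <;> simp [h, ih]

theorem flatMap_filter_eq {α β : Type} (q : α → Bool) (F : α → List β) (l : List α) :
    (l.filter q).flatMap F = l.flatMap (fun a => if q a then F a else []) := by
  induction l with
  | nil => rfl
  | cons x xs ih => by_cases h : q x <;> simp [h, ih]

theorem filterMap_filter_eq {α β : Type} (q : α → Bool) (h : α → Option β) (l : List α) :
    (l.filter q).filterMap h = l.filterMap (fun b => if q b then h b else none) := by
  induction l with
  | nil => rfl
  | cons x xs ih => by_cases hq : q x <;> simp [List.filterMap_cons, hq, ih]

theorem presort_eq (f g : List (List Int)) :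
    ((f.flatMap (fun a => g.map (a ++ ·))).filter
        (fun c => !(c.any (fun x => c.contains (-x))))).map
      (fun c => PySem.List.sorted (PySem.Set.ofList c) (fun x => x) false)
    = ((f.map (fun c => PySem.Set.ofList c)).filter selfOkSet).flatMap (fun a =>
        ((g.map (fun c => PySem.Set.ofList c)).filter selfOkSet).filterMap (fun b =>
          if crossOk a b then
            some (PySem.List.sorted (PySem.Set.union a b) (fun x => x) false)
          else none)) := by
  rw [List.filter_flatMap, List.map_flatMap]
  rw [List.filter_map (p := selfOkSet) (f := fun c => PySem.Set.ofList c) (l := g)]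
  rw [List.filter_map (p := selfOkSet) (f := fun c => PySem.Set.ofList c) (l := f)]
  rw [List.flatMap_map, flatMap_filter_eq]
  apply List.flatMap_congr
  intro a _
  rw [List.filter_map, List.map_map, map_filter_eq_filterMap]
  rw [List.filterMap_map, filterMap_filter_eq]
  simp only [Function.comp]
  by_cases ha : selfOkSet (PySem.Set.ofList a)
  · rw [if_pos ha]
    apply List.filterMap_congr
    intro b _
    rw [conflict_split, sortedDedup_append, ha]
    by_cases hb : selfOkSet (PySem.Set.ofList b)
    · rw [hb]; simp
    · simp only [Bool.not_eq_true] at hb; rw [hb]; simp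
  · rw [if_neg ha]
    simp only [Bool.not_eq_true] at ha
    simp only [List.filterMap_eq_nil_iff]
    intro c hc
    rw [conflict_split, ha]
    simp

theorem foldl_pySetD_length (P : Int → Bool) (js : List Int) (m : List Bool) :
    (js.foldl (fun m j => if P j then PySem.List.pySetD m j true else m) m).length = m.length := by
  induction js generalizing m with
  | nil => rfl
  | cons j js ih =>
    simp only [List.foldl_cons]
    by_cases hP : P j
    · rw [if_pos hP, ih, PySem.List.length_pySetD]
    · rw [if_neg hP, ih]

theorem foldl_pySetD_getD (P : Int → Bool) (js : List Int) (hj : ∀ j ∈ js, 0 ≤ j)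
    (m : List Bool) (n : Nat) :
    (js.foldl (fun m j => if P j then PySem.List.pySetD m j true else m) m).getD n false
    = (m.getD n false || (decide ((n : Int) ∈ js) && P (n : Int) && decide (n < m.length))) := by
  induction js generalizing m with
  | nil => simp
  | cons j js ih =>
    have hj0 : 0 ≤ j := hj j (List.mem_cons_self)
    have hjs : ∀ x ∈ js, 0 ≤ x := fun x hx => hj x (List.mem_cons_of_mem _ hx)
    simp only [List.foldl_cons]
    by_cases hP : P j
    · rw [if_pos hP, ih hjs, PySem.List.pySetD_of_nonneg _ _ hj0]
      have hset : (m.set j.toNat true).getD n false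
          = if j.toNat = n ∧ n < m.length then true else m.getD n false := by
        simp only [List.getD_eq_getElem?_getD, List.getElem?_set]
        split_ifs with h1 h2 h3 <;> simp_all
      rw [hset, List.length_set]
      by_cases hn : (n : Int) = j
      · have htn : j.toNat = n := by omega
        have hPn : P (n : Int) = true := by rw [hn]; exact hP
        by_cases hlen : n < m.length <;>
          simp [htn, hlen, List.mem_cons, hn, hP]
      · have htn : ¬ (j.toNat = n) := by omega
        simp [htn, List.mem_cons, hn]
    · rw [if_neg hP, ih hjs]
      by_cases hn : (n : Int) = j
      · have hPn : P (n : Int) = false := by rw [hn]; simpa using hP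
        simp [hPn]
      · simp [List.mem_cons, hn]

def keepStep (res : List (List Int)) (c : List Int) : List (List Int) :=
  if res.any (fun p => isPrefixPy p c) then res else res ++ [c]

def markStep (M : List (List Int)) (l : Nat) (st : List Bool × List (List Int)) (i : Int) :
    List Bool × List (List Int) :=
  if PySem.List.pyGetD st.1 i false then st
  else
    ((PySem.List.pyRange (i + 1) (l : Int) 1).foldl (fun m j =>
        if isPrefixPy (PySem.List.pyGetD M i []) (PySem.List.pyGetD M j []) then
          PySem.List.pySetD m j true
        else m) st.1,
     st.2 ++ [PySem.List.pyGetD M i []])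

def markLoop (M : List (List Int)) (l : Nat) (t : Nat) : List Bool × List (List Int) :=
  (PySem.List.pyRange 0 (t : Int) 1).foldl (markStep M l) (List.replicate l false, [])

theorem markLoop_succ (M : List (List Int)) (l : Nat) (t : Nat) :
    markLoop M l (t + 1) = markStep M l (markLoop M l t) (t : Int) := by
  unfold markLoop
  rw [show ((t + 1 : Nat) : Int) = (t : Int) + 1 by push_cast; ring,
    PySem.List.pyRange_one_succ_right (by positivity), List.foldl_append,
    List.foldl_cons, List.foldl_nil]

theorem take_foldl_keepStep (M : List (List Int)) (t : Nat) (ht : t < M.length) :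
    (M.take (t + 1)).foldl keepStep []
      = keepStep ((M.take t).foldl keepStep []) (M.getD t []) := by
  rw [List.take_add_one, List.getElem?_eq_getElem ht, Option.toList_some, List.foldl_append,
    List.foldl_cons, List.foldl_nil, List.getD_eq_getElem?_getD, List.getElem?_eq_getElem ht]
  rfl

theorem outer_inv (M : List (List Int)) (t : Nat) (ht : t ≤ M.length) :
    (markLoop M M.length t).1.length = M.length ∧
    (markLoop M M.length t).2 = (M.take t).foldl keepStep [] ∧
    ∀ n : Nat, t ≤ n → n < M.length →
      (markLoop M M.length t).1.getD n false
        = (markLoop M M.length t).2.any (fun p => isPrefixPy p (M.getD n [])) := by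
  induction t with
  | zero =>
    unfold markLoop
    rw [show ((0 : Nat) : Int) = 0 by norm_num, PySem.List.pyRange_one_eq_nil (by norm_num)]
    refine ⟨by simp, by simp, ?_⟩
    intro n _ hn
    simp [List.getD_eq_getElem?_getD, hn]
  | succ t ih =>
    obtain ⟨hlen, hres, hmark⟩ := ih (by omega)
    have htlen : t < M.length := by omega
    have hMget : PySem.List.pyGetD M (t : Int) [] = M.getD t [] := by
      simp [PySem.List.pyGetD_natCast]
    have hread : PySem.List.pyGetD (markLoop M M.length t).1 (t : Int) false
        = (markLoop M M.length t).2.any (fun p => isPrefixPy p (M.getD t [])) := by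
      rw [PySem.List.pyGetD_natCast]
      exact hmark t le_rfl htlen
    rw [markLoop_succ M M.length t, take_foldl_keepStep M t htlen]
    simp only [markStep]
    by_cases hc : (markLoop M M.length t).2.any (fun p => isPrefixPy p (M.getD t [])) = true
    · rw [hread, hc, if_pos rfl]
      refine ⟨hlen, ?_, ?_⟩
      · rw [hres, keepStep, ← hres, hc]; rfl
      · intro n hn1 hn2
        exact hmark n (by omega) hn2
    · have hc' : (markLoop M M.length t).2.any (fun p => isPrefixPy p (M.getD t [])) = false := by
        simpa using hc
      rw [hread, hc', if_neg (by simp)]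
      have hj : ∀ j ∈ PySem.List.pyRange ((t : Int) + 1) (M.length : Int) 1, 0 ≤ j := by
        intro j hjm
        rw [PySem.List.mem_pyRange_one] at hjm
        omega
      refine ⟨?_, ?_, ?_⟩
      · simpa [foldl_pySetD_length] using hlen
      · rw [← hres]
        simp only [keepStep]
        rw [hc', hMget]
        simp
      · intro n hn1 hn2
        simp only
        rw [foldl_pySetD_getD _ _ hj _ n, hmark n (by omega) hn2, hlen]
        have hmem : ((n : Int) ∈ PySem.List.pyRange ((t : Int) + 1) (M.length : Int) 1) := by
          rw [PySem.List.mem_pyRange_one]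
          constructor <;> [omega; exact_mod_cast hn2]
        have hPn : isPrefixPy (PySem.List.pyGetD M (t : Int) []) (PySem.List.pyGetD M (n : Int) [])
            = isPrefixPy (M.getD t []) (M.getD n []) := by
          rw [hMget, PySem.List.pyGetD_natCast]
        rw [hPn]
        simp [hmem, hn2, hMget, List.any_append]

theorem Aloop_eq_keepfold (R : List (List Int)) (l0 : Nat) (hl : l0 = R.length) :
    (((PySem.List.pyRange 0 (l0 : Int) 1).foldl (fun (st : List Bool × List (List Int)) i =>
      if PySem.List.pyGetD st.1 i false then st
      else
        let m := (PySem.List.pyRange (i + 1) (l0 : Int) 1).foldl (fun m j =>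
            if isPrefixPy (PySem.List.pyGetD R i []) (PySem.List.pyGetD R j []) then
              PySem.List.pySetD m j true
            else m) st.1
        (m, st.2 ++ [PySem.List.pyGetD R i []])) (List.replicate l0 false, ([] : List (List Int))))).2
    = R.foldl keepStep [] := by
  subst hl
  have h := outer_inv R R.length le_rfl
  calc (((PySem.List.pyRange 0 (R.length : Int) 1).foldl (fun (st : List Bool × List (List Int)) i =>
      if PySem.List.pyGetD st.1 i false then st
      else
        let m := (PySem.List.pyRange (i + 1) (R.length : Int) 1).foldl (fun m j =>
            if isPrefixPy (PySem.List.pyGetD R i []) (PySem.List.pyGetD R j []) then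
              PySem.List.pySetD m j true
            else m) st.1
        (m, st.2 ++ [PySem.List.pyGetD R i []])) (List.replicate R.length false, ([] : List (List Int))))).2
      = (markLoop R R.length R.length).2 := rfl
    _ = (R.take R.length).foldl keepStep [] := h.2.1
    _ = R.foldl keepStep [] := by rw [List.take_length]

-- prefix facts for Python list order on List Int
theorem lex_append (p : List Int) (a : Int) (t : List Int) :
    List.Lex (· < ·) p (p ++ a :: t) := by
  induction p with
  | nil => exact List.Lex.nil
  | cons x p ih => exact List.Lex.cons ih

theorem prefix_le (p c : List Int) (h : p <+: c) : p ≤ c := by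
  obtain ⟨t, rfl⟩ := h
  cases t with
  | nil => simp
  | cons a t => exact le_of_lt (lex_append p a t)

-- core List.instLT and Mathlib's LinearOrder on lists order lists identically
theorem sorted_inst_bridge (xs : List (List Int)) :
    PySem.List.sorted xs (fun x => x) false
    = @PySem.List.sorted (List Int) (List Int) List.instLinearOrder.toLT
        LinearOrder.toDecidableLT xs (fun x => x) false := by
  rw [@PySem.List.sorted_eq_foldl_insertBy (List Int) (List Int) List.instLT _ xs (fun x => x),
    @PySem.List.sorted_eq_foldl_insertBy (List Int) (List Int) List.instLinearOrder.toLT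
      LinearOrder.toDecidableLT xs (fun x => x)]
  congr 1
  funext acc x
  congr 1
  funext a b
  exact decide_eq_decide.mpr Iff.rfl

theorem prefix_antisymm (p c : List Int) (h1 : p <+: c) (h2 : c <+: p) : p = c := by
  exact h1.eq_of_length (le_antisymm h1.length_le h2.length_le)

-- the fold invariant: keepStep over a ≤-sorted list keeps exactly the clauses with no
-- proper prefix in the list
theorem fold_keep_inv (L procd acc : List (List Int))
    (hsort : (procd ++ L).Pairwise (fun a b => a ≤ b))
    (h1 : ∀ q ∈ procd, ∃ r ∈ acc, r <+: q)
    (h2 : ∀ c, c ∈ acc ↔ c ∈ procd ∧ ∀ p ∈ procd, p <+: c → p = c)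
    (h3 : acc.Sublist procd) (h4 : acc.Nodup) :
    (∀ c, c ∈ L.foldl keepStep acc ↔
        c ∈ procd ++ L ∧ ∀ p ∈ procd ++ L, p <+: c → p = c)
    ∧ (L.foldl keepStep acc).Sublist (procd ++ L) ∧ (L.foldl keepStep acc).Nodup := by
  induction L generalizing procd acc with
  | nil =>
    simp only [List.foldl_nil, List.append_nil]
    exact ⟨h2, h3, h4⟩
  | cons x L ih =>
    have hsort' : ((procd ++ [x]) ++ L).Pairwise (fun a b => a ≤ b) := by
      simpa [List.append_assoc] using hsort
    have hple : ∀ a ∈ procd, a ≤ x := by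
      rw [List.pairwise_append] at hsort
      exact fun a ha => hsort.2.2 a ha x (List.mem_cons_self)
    simp only [List.foldl_cons, keepStep]
    by_cases hany : acc.any (fun p => isPrefixPy p x) = true
    · rw [if_pos hany]
      obtain ⟨r0, hr0acc, hr0pre⟩ := List.any_eq_true.1 hany
      rw [isPrefixPy_iff] at hr0pre
      have h1' : ∀ q ∈ procd ++ [x], ∃ r ∈ acc, r <+: q := by
        intro q hq
        rcases List.mem_append.1 hq with hq | hq
        · exact h1 q hq
        · rw [List.mem_singleton] at hq
          exact ⟨r0, hr0acc, hq ▸ hr0pre⟩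
      have h2' : ∀ c, c ∈ acc ↔ c ∈ procd ++ [x] ∧ ∀ p ∈ procd ++ [x], p <+: c → p = c := by
        intro c
        constructor
        · intro hc
          obtain ⟨hcp, hcond⟩ := (h2 c).1 hc
          refine ⟨List.mem_append_left _ hcp, ?_⟩
          intro p hp hpc
          rcases List.mem_append.1 hp with hp | hp
          · exact hcond p hp hpc
          · rw [List.mem_singleton] at hp
            subst hp
            have hr0c : r0 = c := hcond r0 (h3.subset hr0acc) (hr0pre.trans hpc)
            exact prefix_antisymm _ _ hpc (hr0c ▸ hr0pre)
        · rintro ⟨hcm, hcond⟩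
          rcases List.mem_append.1 hcm with hcp | hcx
          · exact (h2 c).2 ⟨hcp, fun p hp => hcond p (List.mem_append_left _ hp)⟩
          · rw [List.mem_singleton] at hcx
            subst hcx
            have := hcond r0 (List.mem_append_left _ (h3.subset hr0acc)) hr0pre
            exact this ▸ hr0acc
      have h3' : acc.Sublist (procd ++ [x]) := h3.trans (List.sublist_append_left _ _)
      simpa [List.append_assoc] using ih (procd ++ [x]) acc hsort' h1' h2' h3' h4
    · rw [if_neg hany]
      have hnp : ∀ r ∈ acc, ¬ r <+: x := by
        intro r hr
        rw [← isPrefixPy_iff]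
        have := List.any_eq_false.1 (Bool.not_eq_true _ ▸ hany) r hr
        simp [this]
      have hnoprocd : ∀ p ∈ procd, ¬ p <+: x := by
        intro p hp hpx
        obtain ⟨r, hr, hrp⟩ := h1 p hp
        exact hnp r hr (hrp.trans hpx)
      have hxnacc : x ∉ acc := fun hx => hnp x hx (List.prefix_refl x)
      have h1' : ∀ q ∈ procd ++ [x], ∃ r ∈ acc ++ [x], r <+: q := by
        intro q hq
        rcases List.mem_append.1 hq with hq | hq
        · obtain ⟨r, hr, hrq⟩ := h1 q hq
          exact ⟨r, List.mem_append_left _ hr, hrq⟩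
        · rw [List.mem_singleton] at hq
          exact ⟨x, List.mem_append_right _ (List.mem_singleton_self x), hq ▸ List.prefix_refl x⟩
      have h2' : ∀ c, c ∈ acc ++ [x] ↔ c ∈ procd ++ [x] ∧ ∀ p ∈ procd ++ [x], p <+: c → p = c := by
        intro c
        constructor
        · intro hc
          rcases List.mem_append.1 hc with hca | hcx
          · obtain ⟨hcp, hcond⟩ := (h2 c).1 hca
            refine ⟨List.mem_append_left _ hcp, ?_⟩
            intro p hp hpc
            rcases List.mem_append.1 hp with hp | hp
            · exact hcond p hp hpc
            · rw [List.mem_singleton] at hp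
              subst hp
              exact le_antisymm (prefix_le _ _ hpc) (hple c hcp)
          · rw [List.mem_singleton] at hcx
            subst hcx
            refine ⟨List.mem_append_right _ (List.mem_singleton_self c), ?_⟩
            intro p hp hpc
            rcases List.mem_append.1 hp with hp | hp
            · exact absurd hpc (hnoprocd p hp)
            · exact List.mem_singleton.1 hp
        · rintro ⟨hcm, hcond⟩
          rcases List.mem_append.1 hcm with hcp | hcx
          · exact List.mem_append_left _
              ((h2 c).2 ⟨hcp, fun p hp => hcond p (List.mem_append_left _ hp)⟩)
          · exact List.mem_append_right _ hcx
      have h3' : (acc ++ [x]).Sublist (procd ++ [x]) := h3.append (List.Sublist.refl [x])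
      have h4' : (acc ++ [x]).Nodup := by
        refine h4.append (List.nodup_singleton x) ?_
        intro a ha hax
        rw [List.mem_singleton] at hax
        exact hxnacc (hax ▸ ha)
      simpa [List.append_assoc] using ih (procd ++ [x]) (acc ++ [x]) hsort' h1' h2' h3' h4'

-- membership of A's kept list
theorem fold_keep_mem (M : List (List Int)) :
    (∀ c, c ∈ (PySem.List.sorted M (fun x => x) false).foldl keepStep [] ↔
        c ∈ M ∧ ∀ p ∈ M, p <+: c → p = c)
    ∧ ((PySem.List.sorted M (fun x => x) false).foldl keepStep []).Pairwise
        (fun a b => a < b) := by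
  have hsort : (PySem.List.sorted M (fun x => x) false).Pairwise (fun a b => a ≤ b) := by
    rw [sorted_inst_bridge]
    exact PySem.List.sorted_pairwise M (fun x => x)
  have hinv := fold_keep_inv (PySem.List.sorted M (fun x => x) false) [] []
    (by simpa using hsort) (by simp) (by simp) (List.nil_sublist _) List.nodup_nil
  simp only [List.nil_append] at hinv
  obtain ⟨hmem, hsub, hnd⟩ := hinv
  constructor
  · intro c
    rw [hmem c]
    constructor
    · rintro ⟨hc, hcond⟩
      exact ⟨(PySem.List.mem_sorted _ _ _ _).1 hc,
        fun p hp => hcond p ((PySem.List.mem_sorted _ _ _ _).2 hp)⟩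
    · rintro ⟨hc, hcond⟩
      exact ⟨(PySem.List.mem_sorted _ _ _ _).2 hc,
        fun p hp => hcond p ((PySem.List.mem_sorted _ _ _ _).1 hp)⟩
  · have hle := List.Pairwise.sublist hsub hsort
    have hne : ((PySem.List.sorted M (fun x => x) false).foldl keepStep []).Pairwise
        (fun a b : List Int => a ≠ b) := hnd
    exact (hle.and hne).imp (fun h => lt_of_le_of_ne h.1 h.2)

theorem fold_eq_alt_filter (M : List (List Int)) :
    (PySem.List.sorted M (fun x => x) false).foldl keepStep []
    = PySem.List.sorted ((PySem.Set.ofList M).filter (fun c =>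
        (List.range c.length).all (fun k => !(PySem.Set.contains (PySem.Set.ofList M) (c.take k)))))
        (fun x => x) false := by
  obtain ⟨hmem, hlt⟩ := fold_keep_mem M
  have hchar : ∀ c : List Int,
      (c ∈ M ∧ ∀ p ∈ M, p <+: c → p = c) ↔
      (c ∈ PySem.Set.ofList M ∧ (List.range c.length).all
        (fun k => !(PySem.Set.contains (PySem.Set.ofList M) (c.take k))) = true) := by
    intro c
    simp only [PySem.Set.mem_ofList, List.all_eq_true, List.mem_range,
      Bool.not_eq_eq_eq_not, Bool.not_true, PySem.Set.contains_eq_listContains,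
      List.contains_eq_mem, decide_eq_false_iff_not, PySem.Set.mem_ofList]
    constructor
    · rintro ⟨hc, hcond⟩
      refine ⟨hc, fun k hk hmem' => ?_⟩
      have := hcond (c.take k) hmem' (List.take_prefix k c)
      have hlen := congrArg List.length this
      simp only [List.length_take] at hlen
      omega
    · rintro ⟨hc, hcond⟩
      refine ⟨hc, fun p hp hpc => ?_⟩
      by_contra hne
      have hlt' : p.length < c.length := by
        rcases lt_or_eq_of_le hpc.length_le with h | h
        · exact h
        · exact absurd (hpc.eq_of_length h) hne
      exact hcond p.length hlt' (List.prefix_iff_eq_take.1 hpc ▸ hp)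
  have hnodupF : ((PySem.List.sorted M (fun x => x) false).foldl keepStep []).Nodup :=
    hlt.imp (fun h => ne_of_lt h)
  have hperm : ((PySem.List.sorted M (fun x => x) false).foldl keepStep []).Perm
      ((PySem.Set.ofList M).filter (fun c =>
        (List.range c.length).all (fun k => !(PySem.Set.contains (PySem.Set.ofList M) (c.take k))))) := by
    rw [List.perm_ext_iff_of_nodup hnodupF
      ((PySem.Set.nodup_ofList M).filter _)]
    intro c
    rw [hmem c, List.mem_filter]
    exact hchar c
  conv_rhs => rw [sorted_inst_bridge]
  exact (PySem.List.sorted_eq_of_perm_of_pairwise_lt _ _ (fun x => x) hperm hlt).symm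

-- ===== VERDICT (by name: the statement is the Claim_ definition above) =====
theorem combAND_with_not_spec : Claim_equal_combAND_with_not := by
  intro f g _
  show combAND_with_not f g = combAND_with_not_alt f g
  unfold combAND_with_not combAND_with_not_alt reducePy
  simp only [auxEq, PySem.List.foldl_append_if_eq_filter, List.nil_append, Bool.not_true,
    Bool.false_eq_true, if_false]
  rw [Aloop_eq_keepfold _ _ (by rw [PySem.List.length_sorted, List.length_map]), presort_eq]
  exact fold_eq_alt_filter _
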